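-- pv_equiv track=rewrite | github.com/iansan5653/open-mcr | code/mcta_processing.py | calc_mcta_answers
-- ===== SOURCE A (Python) =====
-- import typing as tp
--
-- def calc_mcta_answers(code: str, fqci: int, fcfv: int, answers: tp.List[tp.List[str]]) -> list():
--     mcta_answers = []
--     mcta_answers.append(answers[0][fqci:])
--     for row in answers:
--         if row[fcfv] == code:
--             mcta_answers.append(row[fqci:])
--
--     first_col = []
--     first_col.append("")
--     for i in range(1, len(mcta_answers)):
--         first_col.append(f"Student{i}")
--     for x, y in zip(mcta_answers, first_col):
--         x.insert(0,y)
--     return mcta_answers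
-- ===== SOURCE B (Python) =====
-- def calc_mcta_answers(code, fqci, fcfv, answers):
--     result = [[""] + answers[0][fqci:]]
--     count = 0
--     for row in answers:
--         if row[fcfv] == code:
--             count += 1
--             result.append(["Student%d" % count] + row[fqci:])
--     return result
-- ===== Notes on version B (the rewrite author's own statement) =====
-- stated objective: simpler
-- what changed: B fuses A's three phases (collect matching slices, build a separate label column, zip-and-insert) into one pass that threads a student counter and prepends each label as the row is appended.
import Mathlib
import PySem

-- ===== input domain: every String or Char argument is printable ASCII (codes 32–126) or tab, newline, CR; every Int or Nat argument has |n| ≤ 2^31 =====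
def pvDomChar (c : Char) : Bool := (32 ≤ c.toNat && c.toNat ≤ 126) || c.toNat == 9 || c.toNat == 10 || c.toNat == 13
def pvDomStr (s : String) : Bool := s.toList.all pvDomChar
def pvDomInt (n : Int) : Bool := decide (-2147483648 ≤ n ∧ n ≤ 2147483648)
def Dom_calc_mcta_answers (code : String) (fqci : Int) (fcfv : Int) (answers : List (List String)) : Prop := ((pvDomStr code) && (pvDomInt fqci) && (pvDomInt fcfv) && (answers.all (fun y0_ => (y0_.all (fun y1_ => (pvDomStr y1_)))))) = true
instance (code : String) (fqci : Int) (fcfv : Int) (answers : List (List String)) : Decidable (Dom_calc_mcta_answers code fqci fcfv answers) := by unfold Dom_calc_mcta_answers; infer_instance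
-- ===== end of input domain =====

-- B fuses A's three phases (collect rows, build a label column, zip-and-insert) into one
-- counter-threaded pass; objective: simpler (same asymptotic cost).

-- ===== PORT A =====
def calc_mcta_answers (code : String) (fqci : Int) (fcfv : Int) (answers : List (List String)) : List (List String) :=
  -- mcta_answers = [answers[0][fqci:]]; for row in answers: if row[fcfv] == code: append row[fqci:]
  let mcta := answers.foldl
    (fun acc row =>
      if PySem.List.pyGetD row fcfv "" == code then acc ++ [PySem.List.slice row (some fqci) none] else acc)
    [PySem.List.slice (answers.headD []) (some fqci) none]
  -- first_col = [""] + ["Student{i}" for i in range(1, len(mcta_answers))]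
  let firstCol := "" :: (PySem.List.pyRange 1 (mcta.length : Int) 1).map (fun i => "Student" ++ PySem.Int.toStr i)
  -- for x, y in zip(mcta_answers, first_col): x.insert(0, y)
  (mcta.zip firstCol).map (fun p => p.2 :: p.1)

-- ===== PORT B =====
def calc_mcta_answers_alt (code : String) (fqci : Int) (fcfv : Int) (answers : List (List String)) : List (List String) :=
  (answers.foldl
    (fun (st : List (List String) × Int) row =>
      if PySem.List.pyGetD row fcfv "" == code then
        (st.1 ++ [("Student" ++ PySem.Int.toStr (st.2 + 1)) :: PySem.List.slice row (some fqci) none], st.2 + 1)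
      else st)
    ([("" :: PySem.List.slice (answers.headD []) (some fqci) none)], 0)).1

-- ===== PRECONDITION & SPEC =====
-- Pre_ excludes exactly the inputs where the Python A raises: empty answers (IndexError on
-- answers[0]) and rows for which index fcfv is out of range (IndexError on row[fcfv]).
def Pre_calc_mcta_answers (code : String) (fqci : Int) (fcfv : Int) (answers : List (List String)) : Prop :=
  answers ≠ [] ∧ ∀ row ∈ answers, PySem.Raise.InRange row.length fcfv
instance (code : String) (fqci : Int) (fcfv : Int) (answers : List (List String)) : Decidable (Pre_calc_mcta_answers code fqci fcfv answers) := by unfold Pre_calc_mcta_answers; infer_instance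

def pvWitness_calc_mcta_answers : String × Int × Int × List (List String) :=
  ("a", 1, 0, [["h", "q1"], ["a", "x"], ["b", "y"]])

def Spec_calc_mcta_answers (code : String) (fqci : Int) (fcfv : Int) (answers : List (List String)) (out : List (List String)) : Prop := out = calc_mcta_answers_alt code fqci fcfv answers
instance (code : String) (fqci : Int) (fcfv : Int) (answers : List (List String)) (out : List (List String)) : Decidable (Spec_calc_mcta_answers code fqci fcfv answers out) := by unfold Spec_calc_mcta_answers; infer_instance

-- ===== CLAIM (what is proved, stated in full; the proofs are below) =====
def Claim_equal_calc_mcta_answers : Prop := ∀ (code : String) (fqci : Int) (fcfv : Int) (answers : List (List String)), Dom_calc_mcta_answers code fqci fcfv answers → Pre_calc_mcta_answers code fqci fcfv answers → Spec_calc_mcta_answers code fqci fcfv answers (calc_mcta_answers code fqci fcfv answers)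

-- ===== LEMMAS AND PROOFS =====

/-- Rows labelled `Studentn`, `Student(n+1)`, … prepended. -/
def pvLabelFrom (n : Int) : List (List String) → List (List String)
  | [] => []
  | r :: rs => (("Student" ++ PySem.Int.toStr n) :: r) :: pvLabelFrom (n + 1) rs

theorem pvFoldB (p : List String → Bool) (s : List String → List String) :
    ∀ (xs : List (List String)) (l0 : List (List String)) (n : Int),
      xs.foldl
        (fun (st : List (List String) × Int) row =>
          if p row then (st.1 ++ [("Student" ++ PySem.Int.toStr (st.2 + 1)) :: s row], st.2 + 1) else st)
        (l0, n)
      = (l0 ++ pvLabelFrom (n + 1) ((xs.filter p).map s), n + ((xs.filter p).length : Int)) := by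
  intro xs
  induction xs with
  | nil => intro l0 n; simp [pvLabelFrom]
  | cons x rest ih =>
    intro l0 n
    by_cases hx : p x
    · simp only [List.foldl_cons, hx, if_pos, List.filter_cons_of_pos hx, List.map_cons,
        List.length_cons, ih]
      rw [Prod.mk.injEq]
      refine ⟨by simp [pvLabelFrom, List.append_assoc], by push_cast; ring⟩
    · simp only [List.foldl_cons, hx, if_neg, List.filter_cons_of_neg hx, ih, Bool.false_eq_true,
        not_false_iff]

theorem pvZipLab :
    ∀ (ms : List (List String)) (n : Int),
      ((ms.zip ((PySem.List.pyRange n (n + (ms.length : Int)) 1).map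
          (fun i => "Student" ++ PySem.Int.toStr i))).map (fun p => p.2 :: p.1))
      = pvLabelFrom n ms := by
  intro ms
  induction ms with
  | nil => intro n; simp [pvLabelFrom, PySem.List.pyRange]
  | cons r rs ih =>
    intro n
    have hb : n < n + ((r :: rs).length : Int) := by simp only [List.length_cons]; omega
    rw [PySem.List.pyRange_one_cons hb]
    simp only [List.map_cons, List.zip_cons_cons, pvLabelFrom]
    congr 1
    have harith : n + ((r :: rs).length : Int) = (n + 1) + ((rs.length : Int)) := by
      simp only [List.length_cons]; omega
    rw [harith, ih (n + 1)]

theorem calc_mcta_eq (code : String) (fqci : Int) (fcfv : Int) (answers : List (List String)) :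
    calc_mcta_answers code fqci fcfv answers = calc_mcta_answers_alt code fqci fcfv answers := by
  unfold calc_mcta_answers calc_mcta_answers_alt
  rw [PySem.List.foldl_append_if, pvFoldB]
  set p : List String → Bool := fun row => PySem.List.pyGetD row fcfv "" == code with hp
  set s : List String → List String := fun row => PySem.List.slice row (some fqci) none with hs
  set ms : List (List String) := (answers.filter p).map s with hms
  set hd : List String := s (answers.headD []) with hhd
  show ((([hd] ++ ms).zip
      ("" :: (PySem.List.pyRange 1 ((([hd] ++ ms).length : Nat) : Int) 1).map
        (fun i => "Student" ++ PySem.Int.toStr i))).map (fun p => p.2 :: p.1))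
    = [("" :: hd)] ++ pvLabelFrom (0 + 1) ms
  have hlen : ((([hd] ++ ms).length : Nat) : Int) = 1 + (ms.length : Int) := by
    simp only [List.length_append, List.length_cons, List.length_nil]; push_cast; ring
  rw [hlen]
  simp only [List.singleton_append, List.zip_cons_cons, List.map_cons]
  rw [pvZipLab ms 1]
  norm_num

-- ===== VERDICT (by name: the statement is the Claim_ definition above) =====
theorem calc_mcta_answers_spec : Claim_equal_calc_mcta_answers := by
  intro code fqci fcfv answers _ _
  unfold Spec_calc_mcta_answers
  exact calc_mcta_eq code fqci fcfv answers
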